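-- pv_equiv track=rewrite | github.com/0321minji/baekjoon | 프로그래머스/2/131127. 할인 행사/할인 행사.py | solution
-- ===== SOURCE A (Python) =====
-- from collections import Counter
--
-- def solution(want, number, discount):
--     answer = 0
--     check = {}
--     #zip 함수로 묶어줌
--     for w, n in zip(want, number):
--         check[w] = n
--
--     for i in range(len(discount)-9):
--         temp = Counter(discount[i:i+10])
--         if temp == check:
--             answer += 1
--
--     return answer
-- ===== SOURCE B (Python) =====
-- def solution(want, number, discount):
--     # One sliding-window pass: maintain counts of the current 10-item window,
--     # deleting keys that reach zero, and compare the dict to `check` per shift.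
--     check = dict(zip(want, number))
--     n = len(discount)
--     if n < 10:
--         return 0
--     cur = {}
--     for x in discount[:10]:
--         cur[x] = cur.get(x, 0) + 1
--     answer = 1 if cur == check else 0
--     for i in range(1, n - 9):
--         out = discount[i - 1]
--         c = cur[out] - 1
--         if c == 0:
--             del cur[out]
--         else:
--             cur[out] = c
--         inc = discount[i + 9]
--         cur[inc] = cur.get(inc, 0) + 1
--         if cur == check:
--             answer += 1
--     return answer
-- ===== Notes on version B (the rewrite author's own statement) =====
-- stated objective: faster
-- what changed: A rebuilds a Counter of each 10-item window from scratch and compares it to the wanted dict; B builds the counts of the first window once and slides it along discount, doing one O(1) decrement (deleting keys that reach zero) and one increment per shift before the dict comparison.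
import Mathlib
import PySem

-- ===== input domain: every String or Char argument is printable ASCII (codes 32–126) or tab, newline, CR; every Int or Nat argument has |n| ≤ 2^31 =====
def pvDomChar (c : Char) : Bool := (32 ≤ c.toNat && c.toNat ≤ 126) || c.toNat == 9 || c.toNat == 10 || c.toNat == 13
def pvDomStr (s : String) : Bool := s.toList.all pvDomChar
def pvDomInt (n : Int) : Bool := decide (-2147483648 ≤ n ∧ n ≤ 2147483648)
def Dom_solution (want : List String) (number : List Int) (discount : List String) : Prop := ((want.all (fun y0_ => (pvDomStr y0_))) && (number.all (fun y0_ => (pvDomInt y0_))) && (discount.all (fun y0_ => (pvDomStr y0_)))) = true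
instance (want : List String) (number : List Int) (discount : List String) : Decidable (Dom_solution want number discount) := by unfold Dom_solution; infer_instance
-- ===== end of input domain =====

-- B replaces A's per-window Counter rebuild by a single sliding count dict updated in O(1) per shift (same return value everywhere).

-- ===== PORT A =====
-- Python dict `==` (in CPython 3.11 `Counter(...) == dict` falls back to dict.__eq__):
-- equal sizes and every item of d1 found in d2; exact for dicts with unique keys (both operands here have unique keys).
def pyDictEq (d1 d2 : PySem.Dict String Int) : Bool :=
  d1.size == d2.size && d1.items.all (fun p => d2.get? p.1 == some p.2)

-- `check = {}; for w, n in zip(want, number): check[w] = n`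
def buildCheck (want : List String) (number : List Int) : PySem.Dict String Int :=
  (want.zip number).foldl (fun d p => d.insert p.1 p.2) PySem.Dict.empty

def solution (want : List String) (number : List Int) (discount : List String) : Int :=
  let check := buildCheck want number
  (PySem.List.pyRange 0 ((discount.length : Int) - 9)).foldl
    (fun answer i =>
      let temp := PySem.Dict.counter (PySem.List.slice discount (some i) (some (i + 10)))
      if pyDictEq temp check then answer + 1 else answer) 0

-- ===== PORT B =====
def solution_alt (want : List String) (number : List Int) (discount : List String) : Int :=
  let check := buildCheck want number
  let n := discount.length
  if n < 10 then 0
  else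
    let cur0 := (PySem.List.slice discount none (some 10)).foldl
      (fun d x => d.insert x (d.getD x 0 + 1)) PySem.Dict.empty
    let answer0 : Int := if pyDictEq cur0 check then 1 else 0
    ((PySem.List.pyRange 1 ((n : Int) - 9)).foldl
      (fun (st : PySem.Dict String Int × Int) i =>
        let out := PySem.List.pyGetD discount (i - 1) ""
        let c := st.1.getD out 0 - 1      -- `cur[out]`: the key is always present at this point
        let cur1 := if c == 0 then st.1.erase out else st.1.insert out c
        let inc := PySem.List.pyGetD discount (i + 9) ""
        let cur2 := cur1.insert inc (cur1.getD inc 0 + 1)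
        (cur2, if pyDictEq cur2 check then st.2 + 1 else st.2))
      (cur0, answer0)).2

-- ===== PRECONDITION & SPEC =====
def Spec_solution (want : List String) (number : List Int) (discount : List String) (out : Int) : Prop := out = solution_alt want number discount
instance (want : List String) (number : List Int) (discount : List String) (out : Int) : Decidable (Spec_solution want number discount out) := by unfold Spec_solution; infer_instance

-- ===== CLAIM (what is proved, stated in full; the proofs are below) =====
def Claim_equal_solution : Prop := ∀ (want : List String) (number : List Int) (discount : List String), Dom_solution want number discount → Spec_solution want number discount (solution want number discount)

-- ===== LEMMAS AND PROOFS =====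

-- `d` is the count dict of the window `w`: unique keys, and `d.get?` is exactly
-- "`some (count)` on members of `w`, `none` elsewhere".
def CntRep (d : PySem.Dict String Int) (w : List String) : Prop :=
  d.keys.Nodup ∧ ∀ k, d.get? k = if k ∈ w then some (w.count k : Int) else none

theorem get?_erase (d : PySem.Dict String Int) (k k' : String) :
    (d.erase k).get? k' = if k' = k then none else d.get? k' := by
  obtain ⟨items⟩ := d
  simp only [PySem.Dict.erase, PySem.Dict.get?]
  induction items with
  | nil => simp
  | cons p t ih =>
    by_cases h1 : p.1 = k
    · rw [List.filter_cons_of_neg (by simp [h1]), ih]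
      by_cases h2 : k' = k
      · simp [h2]
      · rw [if_neg h2, if_neg h2,
          List.find?_cons_of_neg (by simp [h1]; exact fun h => h2 h.symm)]
    · rw [List.filter_cons_of_pos (by simp [h1])]
      by_cases h2 : p.1 = k'
      · have hk : ¬ k' = k := fun h => h1 (h2.trans h)
        rw [List.find?_cons_of_pos (by simp [h2]), List.find?_cons_of_pos (by simp [h2]), if_neg hk]
      · rw [List.find?_cons_of_neg (by simp [h2]), List.find?_cons_of_neg (by simp [h2]), ih]

theorem nodup_keys_erase (d : PySem.Dict String Int) (k : String) (h : d.keys.Nodup) :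
    (d.erase k).keys.Nodup := by
  obtain ⟨items⟩ := d
  simp only [PySem.Dict.erase, PySem.Dict.keys] at *
  exact (List.filter_sublist.map _).nodup h

theorem get?_eq_ite (d : PySem.Dict String Int) (k : String) :
    d.get? k = if k ∈ d.keys then some (d.getD k 0) else none := by
  rcases hh : d.get? k with _ | v
  · rw [if_neg ((PySem.Dict.get?_eq_none_iff_not_mem_keys d k).mp hh)]
  · have hm : k ∈ d.keys := by
      by_contra hc
      rw [(PySem.Dict.get?_eq_none_iff_not_mem_keys d k).mpr hc] at hh; cases hh
    rw [if_pos hm, PySem.Dict.getD_eq_get?_getD, hh]; rfl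

theorem cntRep_counter (w : List String) : CntRep (PySem.Dict.counter w) w := by
  refine ⟨PySem.Dict.nodup_keys_counter w, fun k => ?_⟩
  rw [get?_eq_ite, PySem.Dict.getD_counter, PySem.Dict.keys_counter]
  simp [PySem.Set.mem_ofList]

theorem cntRep_getD (d : PySem.Dict String Int) (w : List String) (h : CntRep d w) (k : String) :
    d.getD k 0 = (w.count k : Int) := by
  rw [PySem.Dict.getD_eq_get?_getD, h.2 k]
  by_cases hm : k ∈ w
  · simp [hm]
  · simp [hm, List.count_eq_zero.mpr hm]

theorem size_eq_keys_length (d : PySem.Dict String Int) : d.size = d.keys.length := by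
  simp [PySem.Dict.size, PySem.Dict.keys]

theorem pyDictEq_iff (d d2 : PySem.Dict String Int) (h : d.keys.Nodup) :
    pyDictEq d d2 = true ↔ (d.size = d2.size ∧ ∀ k ∈ d.keys, d2.get? k = d.get? k) := by
  unfold pyDictEq
  rw [Bool.and_eq_true, beq_iff_eq, List.all_eq_true]
  constructor
  · rintro ⟨hs, ha⟩
    refine ⟨hs, fun k hk => ?_⟩
    rw [get?_eq_ite d k, if_pos hk]
    have := ha (k, d.getD k 0) ?_
    · simpa using this
    · rw [PySem.Dict.items_eq_map_keys d h 0]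
      exact List.mem_map.mpr ⟨k, hk, rfl⟩
  · rintro ⟨hs, ha⟩
    refine ⟨hs, fun p hp => ?_⟩
    obtain ⟨k, v⟩ := p
    have hk : k ∈ d.keys := PySem.Dict.mem_keys_of_mem_items d hp
    have h2 := ha k hk
    rw [PySem.Dict.get?_of_mem_items d hp h] at h2
    simp [h2]

theorem pyDictEq_congr (d1 d1' d2 : PySem.Dict String Int)
    (h1 : d1.keys.Nodup) (h1' : d1'.keys.Nodup)
    (hg : ∀ k, d1.get? k = d1'.get? k) : pyDictEq d1 d2 = pyDictEq d1' d2 := by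
  have hmem : ∀ k, k ∈ d1.keys ↔ k ∈ d1'.keys := by
    intro k
    rw [← not_iff_not]
    simp only [← PySem.Dict.get?_eq_none_iff_not_mem_keys, hg]
  have hperm : d1.keys.Perm d1'.keys := (List.perm_ext_iff_of_nodup h1 h1').mpr hmem
  have hsz : d1.size = d1'.size := by
    rw [size_eq_keys_length, size_eq_keys_length, hperm.length_eq]
  rw [Bool.eq_iff_iff, pyDictEq_iff _ _ h1, pyDictEq_iff _ _ h1']
  constructor
  · rintro ⟨hs, ha⟩
    exact ⟨hsz ▸ hs, fun k hk => by rw [← hg, ha k ((hmem k).mpr hk)]⟩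
  · rintro ⟨hs, ha⟩
    exact ⟨hsz ▸ hs, fun k hk => by rw [hg, ha k ((hmem k).mp hk)]⟩

theorem cntRep_dec (d : PySem.Dict String Int) (a : String) (w : List String)
    (h : CntRep d (a :: w)) :
    CntRep (if (d.getD a 0 - 1) == 0 then d.erase a else d.insert a (d.getD a 0 - 1)) w := by
  have hga : d.getD a 0 = (w.count a : Int) + 1 := by
    rw [cntRep_getD d _ h a]; simp
  by_cases hz : w.count a = 0
  · have hna : a ∉ w := List.count_eq_zero.mp hz
    rw [if_pos (by simp [hga, hz])]
    refine ⟨nodup_keys_erase d a h.1, fun k => ?_⟩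
    rw [get?_erase]
    by_cases hk : k = a
    · simp [hk, hna]
    · have hk' : ¬ a = k := fun h' => hk h'.symm
      rw [if_neg hk, h.2 k]
      simp [hk, hk', List.mem_cons]
  · rw [if_neg (by simp [hga]; omega)]
    refine ⟨PySem.Dict.nodup_keys_insert d a _ h.1, fun k => ?_⟩
    rw [PySem.Dict.get?_insert]
    by_cases hk : k = a
    · rw [if_pos hk, hk, if_pos (List.count_pos_iff.mp (Nat.pos_of_ne_zero hz)), hga]
      ring_nf
    · have hk' : ¬ a = k := fun h' => hk h'.symm
      rw [if_neg hk, h.2 k]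
      simp [hk, hk', List.mem_cons]

theorem cntRep_inc (d : PySem.Dict String Int) (b : String) (w : List String)
    (h : CntRep d w) : CntRep (d.insert b (d.getD b 0 + 1)) (w ++ [b]) := by
  refine ⟨PySem.Dict.nodup_keys_insert d b _ h.1, fun k => ?_⟩
  rw [PySem.Dict.get?_insert]
  by_cases hk : k = b
  · rw [if_pos hk, hk, if_pos (by simp), cntRep_getD d w h b]
    simp [List.count_append]
  · have hk' : ¬ b = k := fun h' => hk h'.symm
    rw [if_neg hk, h.2 k]
    simp [List.count_append, List.mem_append, hk, hk']

-- the per-window test depends only on the represented window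
theorem cntRep_test (d : PySem.Dict String Int) (w : List String) (check : PySem.Dict String Int)
    (h : CntRep d w) : pyDictEq d check = pyDictEq (PySem.Dict.counter w) check := by
  refine pyDictEq_congr _ _ _ h.1 (cntRep_counter w).1 (fun k => ?_)
  rw [h.2 k, (cntRep_counter w).2 k]

-- window decompositions
theorem window_cons (xs : List String) (j : Nat) (h : j < xs.length) :
    List.take 10 (List.drop j xs) = xs[j] :: List.take 9 (List.drop (j + 1) xs) := by
  rw [List.drop_eq_getElem_cons h, List.take_succ_cons]

theorem window_snoc (xs : List String) (j : Nat) (h : j + 10 ≤ xs.length) :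
    List.take 10 (List.drop j xs) = List.take 9 (List.drop j xs) ++ [xs[j + 9]] := by
  have h9 : 9 < (xs.drop j).length := by simp; omega
  rw [show (10 : Nat) = 9 + 1 from rfl, List.take_add_one, List.getElem?_eq_getElem h9]
  simp
  rfl

theorem slide (check : PySem.Dict String Int) (discount : List String) :
    ∀ (k j : Nat) (cur : PySem.Dict String Int) (a : Int),
    1 ≤ j → j + k + 9 = discount.length →
    CntRep cur (List.take 10 (List.drop (j - 1) discount)) →
    ((PySem.List.pyRange (j : Int) ((discount.length : Int) - 9)).foldl
      (fun (st : PySem.Dict String Int × Int) i =>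
        let out := PySem.List.pyGetD discount (i - 1) ""
        let c := st.1.getD out 0 - 1
        let cur1 := if c == 0 then st.1.erase out else st.1.insert out c
        let inc := PySem.List.pyGetD discount (i + 9) ""
        let cur2 := cur1.insert inc (cur1.getD inc 0 + 1)
        (cur2, if pyDictEq cur2 check then st.2 + 1 else st.2))
      (cur, a)).2
    = (PySem.List.pyRange (j : Int) ((discount.length : Int) - 9)).foldl
      (fun answer i =>
        let temp := PySem.Dict.counter (PySem.List.slice discount (some i) (some (i + 10)))
        if pyDictEq temp check then answer + 1 else answer) a := by
  intro k
  induction k with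
  | zero =>
    intro j cur a hj hlen _
    rw [PySem.List.pyRange_one_eq_nil (by omega : (discount.length : Int) - 9 ≤ (j : Int))]
    rfl
  | succ k ih =>
    intro j cur a hj hlen hrep
    have hlt : (j : Int) < (discount.length : Int) - 9 := by omega
    rw [PySem.List.pyRange_one_cons hlt]
    simp only [List.foldl_cons]
    have hlt1 : j - 1 < discount.length := by omega
    have hlt2 : j + 9 < discount.length := by omega
    have hout : PySem.List.pyGetD discount ((j : Int) - 1) "" = discount[j - 1] := by
      rw [show ((j : Int) - 1) = ((j - 1 : Nat) : Int) from by omega, PySem.List.pyGetD_natCast]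
      simp [List.getD, List.getElem?_eq_getElem hlt1]
    have hinc : PySem.List.pyGetD discount ((j : Int) + 9) "" = discount[j + 9] := by
      rw [show ((j : Int) + 9) = ((j + 9 : Nat) : Int) from by omega, PySem.List.pyGetD_natCast]
      simp [List.getD, List.getElem?_eq_getElem hlt2]
    -- window (j-1) = discount[j-1] :: mid ;  window j = mid ++ [discount[j+9]]
    have hw0 := window_cons discount (j - 1) hlt1
    rw [show j - 1 + 1 = j from by omega] at hw0
    have hw1 := window_snoc discount j (by omega)
    rw [hw0] at hrep
    have hmid := cntRep_dec _ _ _ hrep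
    have hrep2' := cntRep_inc _ (discount[j + 9]) _ hmid
    have hrep2 : CntRep ((if ((cur.getD discount[j - 1] 0 - 1) == 0) then cur.erase discount[j - 1]
          else cur.insert discount[j - 1] (cur.getD discount[j - 1] 0 - 1)).insert discount[j + 9]
          (((if ((cur.getD discount[j - 1] 0 - 1) == 0) then cur.erase discount[j - 1]
          else cur.insert discount[j - 1] (cur.getD discount[j - 1] 0 - 1)).getD discount[j + 9] 0) + 1))
        (List.take 10 (List.drop j discount)) := by
      rw [hw1]; exact hrep2'
    have htest := cntRep_test _ _ check hrep2
    have hslice : PySem.List.slice discount (some (j : Int)) (some ((j : Int) + 10))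
        = List.take 10 (List.drop j discount) := by
      rw [show ((j : Int) + 10) = ((j + 10 : Nat) : Int) from by omega, PySem.List.slice_natCast,
        show j + 10 - j = 10 from by omega]
    rw [hout, hinc, hslice, ← htest]
    rw [show ((j : Int) + 1) = ((j + 1 : Nat) : Int) from by omega]
    exact ih (j + 1) _ _ (by omega) (by omega) hrep2

-- ===== VERDICT (by name: the statement is the Claim_ definition above) =====
theorem solution_spec : Claim_equal_solution := by
  intro want number discount _
  unfold Spec_solution solution solution_alt
  by_cases hn : discount.length < 10
  · rw [if_pos hn, PySem.List.pyRange_one_eq_nil (by omega : (discount.length : Int) - 9 ≤ 0)]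
    rfl
  · rw [if_neg hn,
      PySem.List.pyRange_one_cons (by omega : (0 : Int) < (discount.length : Int) - 9)]
    simp only [List.foldl_cons]
    rw [PySem.List.slice_to discount (by norm_num : (0:Int) ≤ 10), show ((10:Int).toNat) = 10 from rfl,
      PySem.Dict.foldl_insert_getD_add_one_eq_counter]
    rw [show (PySem.List.slice discount (some (0:Int)) (some ((0:Int) + 10)))
        = List.take 10 discount from by
      rw [show (0:Int) = ((0:Nat):Int) from rfl,
        show (((0:Nat):Int) + 10) = ((10:Nat):Int) from by norm_num, PySem.List.slice_natCast]
      simp]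
    have hrep : CntRep (PySem.Dict.counter (List.take 10 discount))
        (List.take 10 (List.drop (1 - 1) discount)) := by
      simpa using cntRep_counter (List.take 10 discount)
    have := slide (buildCheck want number) discount (discount.length - 10) 1
      (PySem.Dict.counter (List.take 10 discount))
      (if pyDictEq (PySem.Dict.counter (List.take 10 discount)) (buildCheck want number)
        then 0 + 1 else 0)
      (by omega) (by omega) hrep
    rw [show ((1:Nat):Int) = (0:Int) + 1 from by norm_num] at this
    exact this.symm
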